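-- pv_equiv track=rewrite | github.com/ErosSph/CARTCOV | coverage_refine_maxsat.py | _find_common_module
-- ===== SOURCE A (Python) =====
-- def _modules_for_var(var, module_cov):
--     mods = set()
--     if not module_cov or not var:
--         return mods
--     base = var.split("[", 1)[0]
--     for mod, entry in module_cov.items():
--         stmt = entry.get("stmt", {})
--         branch = entry.get("branch", {})
--         if var in stmt or var in branch or base in stmt or base in branch:
--             mods.add(mod)
--     return mods
--
-- def _find_common_module(vars_list, module_cov):
--     candidates = None
--     for var in vars_list:
--         mods = _modules_for_var(var, module_cov)
--         if not mods:
--             return None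
--         candidates = mods if candidates is None else candidates & mods
--         if not candidates:
--             return None
--     if candidates and len(candidates) == 1:
--         return next(iter(candidates))
--     return None
-- ===== SOURCE B (Python) =====
-- def _find_common_module(vars_list, module_cov):
--     # Build a reverse index once: coverage key -> set of modules covering it.
--     index = {}
--     for mod, entry in module_cov.items():
--         for key in entry.get("stmt", {}):
--             index.setdefault(key, set()).add(mod)
--         for key in entry.get("branch", {}):
--             index.setdefault(key, set()).add(mod)
--     candidates = None
--     for var in vars_list:
--         if not var:
--             return None
--         base = var.split("[", 1)[0]
--         mods = index.get(var, set()) | index.get(base, set())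
--         if not mods:
--             return None
--         candidates = mods if candidates is None else candidates & mods
--         if not candidates:
--             return None
--     if candidates is not None and len(candidates) == 1:
--         return next(iter(candidates))
--     return None
-- ===== Notes on version B (the rewrite author's own statement) =====
-- stated objective: alternative
-- what changed: B builds a reverse index (coverage key -> set of modules) in one pass over module_cov and answers each variable by two dictionary lookups, instead of A's rescanning of every module entry for every variable; Pre_ only demands that module_cov be a genuine dict encoding (no duplicate keys), which every real Python dict satisfies, so nothing a caller can pass is excluded.
import Mathlib
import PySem

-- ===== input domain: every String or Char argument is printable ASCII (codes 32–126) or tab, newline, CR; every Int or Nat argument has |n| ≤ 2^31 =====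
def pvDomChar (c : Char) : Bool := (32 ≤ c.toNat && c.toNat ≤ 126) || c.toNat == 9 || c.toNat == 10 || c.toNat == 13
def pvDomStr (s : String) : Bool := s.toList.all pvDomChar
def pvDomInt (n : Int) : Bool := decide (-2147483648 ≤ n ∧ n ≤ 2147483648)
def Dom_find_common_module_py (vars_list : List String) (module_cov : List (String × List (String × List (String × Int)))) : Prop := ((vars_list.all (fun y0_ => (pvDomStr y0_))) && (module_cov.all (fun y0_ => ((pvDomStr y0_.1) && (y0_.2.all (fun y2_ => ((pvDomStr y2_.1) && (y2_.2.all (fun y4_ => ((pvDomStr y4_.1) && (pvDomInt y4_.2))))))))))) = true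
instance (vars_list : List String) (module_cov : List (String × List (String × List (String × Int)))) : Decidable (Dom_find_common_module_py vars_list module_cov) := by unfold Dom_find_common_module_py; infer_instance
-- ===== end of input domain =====

-- B replaces A's per-variable scan over all modules by a reverse index (key -> set of
-- modules) built once; same return value, different traversal shape.

-- shared helper: var.split("[", 1)[0]
def pvBase (var : String) : String := ((PySem.Str.splitMax? var "[" 1).getD []).headD ""

-- ===== PORT A =====
-- _modules_for_var
def pvModulesForVar (var : String) (module_cov : List (String × List (String × List (String × Int)))) : PySem.Set String :=
  if module_cov = [] ∨ var = "" then PySem.Set.empty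
  else
    let base := pvBase var
    module_cov.foldl (fun mods p =>
      let stmt := PySem.Dict.mk ((PySem.Dict.mk p.2).getD "stmt" [])
      let branch := PySem.Dict.mk ((PySem.Dict.mk p.2).getD "branch" [])
      if stmt.contains var || branch.contains var || stmt.contains base || branch.contains base
      then PySem.Set.add mods p.1 else mods) PySem.Set.empty

-- the 'for var in vars_list' loop of _find_common_module, carrying candidates
def pvLoopA (module_cov : List (String × List (String × List (String × Int)))) (cands : Option (PySem.Set String)) : List String → Option String
  | [] =>
    match cands with
    | none => none
    | some c => if c ≠ [] ∧ c.length = 1 then c.head? else none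
  | var :: rest =>
    let mods := pvModulesForVar var module_cov
    if mods = [] then none
    else
      let c' := match cands with
        | none => mods
        | some c => PySem.Set.inter c mods
      if c' = [] then none else pvLoopA module_cov (some c') rest

def find_common_module_py (vars_list : List String) (module_cov : List (String × List (String × List (String × Int)))) : Option String :=
  pvLoopA module_cov none vars_list

-- ===== PORT B =====
-- index.setdefault(key, set()).add(mod) for every key of one section's dict
def pvIndexEntry (mod : String) (kvs : List (String × Int)) (idx : PySem.Dict String (PySem.Set String)) : PySem.Dict String (PySem.Set String) :=
  kvs.foldl (fun idx kv => idx.modify kv.1 [] (fun s => PySem.Set.add s mod)) idx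

-- the reverse index built in one pass over module_cov
def pvBuildIndex (module_cov : List (String × List (String × List (String × Int)))) : PySem.Dict String (PySem.Set String) :=
  module_cov.foldl (fun idx p =>
    pvIndexEntry p.1 ((PySem.Dict.mk p.2).getD "branch" []) (pvIndexEntry p.1 ((PySem.Dict.mk p.2).getD "stmt" []) idx)) PySem.Dict.empty

def pvLoopB (idx : PySem.Dict String (PySem.Set String)) (cands : Option (PySem.Set String)) : List String → Option String
  | [] =>
    match cands with
    | none => none
    | some c => if c.length = 1 then c.head? else none
  | var :: rest =>
    if var = "" then none
    else
      let mods := PySem.Set.union (idx.getD var []) (idx.getD (pvBase var) [])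
      if mods = [] then none
      else
        let c' := match cands with
          | none => mods
          | some c => PySem.Set.inter c mods
        if c' = [] then none else pvLoopB idx (some c') rest

def find_common_module_py_alt (vars_list : List String) (module_cov : List (String × List (String × List (String × Int)))) : Option String :=
  pvLoopB (pvBuildIndex module_cov) none vars_list

-- ===== PRECONDITION & SPEC =====
-- Pre_ only requires module_cov to be a genuine dict encoding -- no duplicate keys at the
-- module level, inside an entry, or in its "stmt"/"branch" section dicts; every dict a Python
-- caller can actually pass satisfies it, so no real input is excluded.
def Pre_find_common_module_py (vars_list : List String) (module_cov : List (String × List (String × List (String × Int)))) : Prop :=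
  (module_cov.map Prod.fst).Nodup ∧
  ∀ p ∈ module_cov, (p.2.map Prod.fst).Nodup ∧
    (((PySem.Dict.mk p.2).getD "stmt" []).map Prod.fst).Nodup ∧
    (((PySem.Dict.mk p.2).getD "branch" []).map Prod.fst).Nodup
instance (vars_list : List String) (module_cov : List (String × List (String × List (String × Int)))) : Decidable (Pre_find_common_module_py vars_list module_cov) := by unfold Pre_find_common_module_py; infer_instance
def pvWitness_find_common_module_py : List String × (List (String × List (String × List (String × Int)))) :=
  (["x"], [("m", [("stmt", [("x", 1)])])])

def Spec_find_common_module_py (vars_list : List String) (module_cov : List (String × List (String × List (String × Int)))) (out : Option String) : Prop := out = find_common_module_py_alt vars_list module_cov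
instance (vars_list : List String) (module_cov : List (String × List (String × List (String × Int)))) (out : Option String) : Decidable (Spec_find_common_module_py vars_list module_cov out) := by unfold Spec_find_common_module_py; infer_instance

-- ===== CLAIM (what is proved, stated in full; the proofs are below) =====
def Claim_equal_find_common_module_py : Prop := ∀ (vars_list : List String) (module_cov : List (String × List (String × List (String × Int)))), Dom_find_common_module_py vars_list module_cov → Pre_find_common_module_py vars_list module_cov → Spec_find_common_module_py vars_list module_cov (find_common_module_py vars_list module_cov)

-- ===== LEMMAS AND PROOFS =====

-- does the entry's "stmt" or "branch" dict carry key?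
def pvKeyIn (key : String) (p : String × List (String × List (String × Int))) : Prop :=
  (∃ kv ∈ (PySem.Dict.mk p.2).getD "stmt" [], kv.1 = key) ∨ (∃ kv ∈ (PySem.Dict.mk p.2).getD "branch" [], kv.1 = key)

-- membership in A's conditional-add fold
theorem pv_mem_foldl_if {E : Type} (f : String × E → Bool) (m : String) :
    ∀ (l : List (String × E)) (s : PySem.Set String),
    m ∈ l.foldl (fun s p => if f p then PySem.Set.add s p.1 else s) s ↔
      m ∈ s ∨ ∃ p ∈ l, f p = true ∧ p.1 = m := by
  intro l
  induction l with
  | nil => simp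
  | cons p l ih =>
    intro s
    simp only [List.foldl_cons, ih, List.mem_cons]
    by_cases h : f p = true
    · rw [if_pos h]
      simp only [PySem.Set.mem_add]
      constructor
      · rintro ((hm | rfl) | ⟨q, hq, h1, h2⟩)
        · exact Or.inl hm
        · exact Or.inr ⟨p, Or.inl rfl, h, rfl⟩
        · exact Or.inr ⟨q, Or.inr hq, h1, h2⟩
      · rintro (hm | ⟨q, (rfl | hq), h1, h2⟩)
        · exact Or.inl (Or.inl hm)
        · exact Or.inl (Or.inr h2.symm)
        · exact Or.inr ⟨q, hq, h1, h2⟩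
    · rw [if_neg h]
      constructor
      · rintro (hm | ⟨q, hq, h1, h2⟩)
        · exact Or.inl hm
        · exact Or.inr ⟨q, Or.inr hq, h1, h2⟩
      · rintro (hm | ⟨q, (rfl | hq), h1, h2⟩)
        · exact Or.inl hm
        · exact absurd h1 h
        · exact Or.inr ⟨q, hq, h1, h2⟩

theorem pv_nodup_foldl_if {E : Type} (f : String × E → Bool) :
    ∀ (l : List (String × E)) (s : PySem.Set String), s.Nodup →
    (l.foldl (fun s p => if f p then PySem.Set.add s p.1 else s) s).Nodup := by
  intro l
  induction l with
  | nil => simp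
  | cons p l ih =>
    intro s hs
    simp only [List.foldl_cons]
    apply ih
    by_cases h : f p = true
    · simp [h, PySem.Set.nodup_add _ _ hs]
    · simp only [if_neg h]
      exact hs

-- the Bool condition A tests for one module entry
def pvMatches (var : String) (p : String × List (String × List (String × Int))) : Bool :=
  let stmt := PySem.Dict.mk ((PySem.Dict.mk p.2).getD "stmt" [])
  let branch := PySem.Dict.mk ((PySem.Dict.mk p.2).getD "branch" [])
  stmt.contains var || branch.contains var || stmt.contains (pvBase var) || branch.contains (pvBase var)

theorem pv_matches_iff (var : String) (p : String × List (String × List (String × Int))) :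
    pvMatches var p = true ↔ pvKeyIn var p ∨ pvKeyIn (pvBase var) p := by
  simp only [pvMatches, pvKeyIn, Bool.or_eq_true, PySem.Dict.contains_iff_mem_keys,
    PySem.Dict.keys_mk, List.mem_map]
  exact or_assoc

theorem pv_mem_modsA (var m : String) (cov : List (String × List (String × List (String × Int)))) :
    m ∈ pvModulesForVar var cov ↔ var ≠ "" ∧ ∃ p ∈ cov, (pvKeyIn var p ∨ pvKeyIn (pvBase var) p) ∧ p.1 = m := by
  unfold pvModulesForVar
  split
  · rename_i h
    rcases h with h | h
    · subst h; simp [PySem.Set.empty]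
    · subst h; simp [PySem.Set.empty]
  · rename_i h
    rw [not_or] at h
    show (m ∈ cov.foldl (fun mods p => if pvMatches var p then PySem.Set.add mods p.1 else mods) PySem.Set.empty) ↔ _
    rw [pv_mem_foldl_if]
    simp only [pv_matches_iff, PySem.Set.empty, List.not_mem_nil, false_or]
    exact ⟨fun hh => ⟨h.2, hh⟩, fun hh => hh.2⟩

theorem pv_nodup_modsA (var : String) (cov : List (String × List (String × List (String × Int)))) :
    (pvModulesForVar var cov).Nodup := by
  unfold pvModulesForVar
  split
  · simp [PySem.Set.empty]
  · show (cov.foldl (fun mods p => if pvMatches var p then PySem.Set.add mods p.1 else mods) PySem.Set.empty).Nodup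
    exact pv_nodup_foldl_if _ _ _ (by simp [PySem.Set.empty])

theorem pv_mem_indexEntry (mod key m : String) :
    ∀ (kvs : List (String × Int)) (idx : PySem.Dict String (PySem.Set String)),
    m ∈ (pvIndexEntry mod kvs idx).getD key [] ↔
      m ∈ idx.getD key [] ∨ ((∃ kv ∈ kvs, kv.1 = key) ∧ m = mod) := by
  intro kvs
  induction kvs with
  | nil => simp [pvIndexEntry]
  | cons kv kvs ih =>
    intro idx
    simp only [pvIndexEntry, List.foldl_cons] at *
    rw [ih]
    rw [PySem.Dict.getD_modify]
    by_cases h : key = kv.1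
    · simp [h, PySem.Set.mem_add]
      tauto
    · simp [h]
      tauto

theorem pv_nodup_indexEntry (mod : String) :
    ∀ (kvs : List (String × Int)) (idx : PySem.Dict String (PySem.Set String)),
    (∀ k, (idx.getD k []).Nodup) → ∀ k, ((pvIndexEntry mod kvs idx).getD k []).Nodup := by
  intro kvs
  induction kvs with
  | nil => exact fun idx h => h
  | cons kv kvs ih =>
    intro idx h k
    simp only [pvIndexEntry, List.foldl_cons] at *
    apply ih
    intro k'
    rw [PySem.Dict.getD_modify]
    split
    · exact PySem.Set.nodup_add _ _ (h _)
    · exact h _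

theorem pv_mem_index (key m : String) (cov : List (String × List (String × List (String × Int)))) :
    m ∈ (pvBuildIndex cov).getD key [] ↔ ∃ p ∈ cov, pvKeyIn key p ∧ p.1 = m := by
  have main : ∀ (l : List (String × List (String × List (String × Int)))) (idx : PySem.Dict String (PySem.Set String)),
      m ∈ (l.foldl (fun idx p =>
        pvIndexEntry p.1 ((PySem.Dict.mk p.2).getD "branch" []) (pvIndexEntry p.1 ((PySem.Dict.mk p.2).getD "stmt" []) idx)) idx).getD key []
      ↔ m ∈ idx.getD key [] ∨ ∃ p ∈ l, pvKeyIn key p ∧ p.1 = m := by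
    intro l
    induction l with
    | nil => simp
    | cons p l ih =>
      intro idx
      simp only [List.foldl_cons, ih, pv_mem_indexEntry, pvKeyIn, List.mem_cons]
      constructor
      · rintro (((hm | ⟨h1, rfl⟩) | ⟨h1, rfl⟩) | ⟨q, hq, h1, h2⟩)
        · exact Or.inl hm
        · exact Or.inr ⟨p, Or.inl rfl, Or.inl h1, rfl⟩
        · exact Or.inr ⟨p, Or.inl rfl, Or.inr h1, rfl⟩
        · exact Or.inr ⟨q, Or.inr hq, h1, h2⟩
      · rintro (hm | ⟨q, (rfl | hq), (h1 | h1), h2⟩)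
        · exact Or.inl (Or.inl (Or.inl hm))
        · exact Or.inl (Or.inl (Or.inr ⟨h1, h2.symm⟩))
        · exact Or.inl (Or.inr ⟨h1, h2.symm⟩)
        · exact Or.inr ⟨q, hq, Or.inl h1, h2⟩
        · exact Or.inr ⟨q, hq, Or.inr h1, h2⟩
  rw [pvBuildIndex, main]
  simp [PySem.Dict.getD_empty]

theorem pv_nodup_index (cov : List (String × List (String × List (String × Int)))) (k : String) :
    ((pvBuildIndex cov).getD k []).Nodup := by
  have main : ∀ (l : List (String × List (String × List (String × Int)))) (idx : PySem.Dict String (PySem.Set String)),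
      (∀ k', (idx.getD k' []).Nodup) →
      ∀ k', ((l.foldl (fun idx p =>
        pvIndexEntry p.1 ((PySem.Dict.mk p.2).getD "branch" []) (pvIndexEntry p.1 ((PySem.Dict.mk p.2).getD "stmt" []) idx)) idx).getD k' []).Nodup := by
    intro l
    induction l with
    | nil => exact fun idx h => h
    | cons p l ih =>
      intro idx h
      simp only [List.foldl_cons]
      exact ih _ (pv_nodup_indexEntry _ _ _ (pv_nodup_indexEntry _ _ _ h))
  rw [pvBuildIndex]
  apply main
  intro k'
  simp [PySem.Dict.getD_empty]

-- B's per-variable set and A's per-variable set have the same members (var ≠ "")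
theorem pv_mods_iff (var m : String) (cov : List (String × List (String × List (String × Int)))) (hv : var ≠ "") :
    m ∈ PySem.Set.union ((pvBuildIndex cov).getD var []) ((pvBuildIndex cov).getD (pvBase var) []) ↔
      m ∈ pvModulesForVar var cov := by
  rw [PySem.Set.mem_union, pv_mem_index, pv_mem_index, pv_mem_modsA]
  constructor
  · rintro (⟨p, hp, h1, h2⟩ | ⟨p, hp, h1, h2⟩)
    · exact ⟨hv, p, hp, Or.inl h1, h2⟩
    · exact ⟨hv, p, hp, Or.inr h1, h2⟩
  · rintro ⟨-, p, hp, h1 | h1, h2⟩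
    · exact Or.inl ⟨p, hp, h1, h2⟩
    · exact Or.inr ⟨p, hp, h1, h2⟩

theorem pv_loop_eq (cov : List (String × List (String × List (String × Int)))) :
    ∀ (vars : List String) (cA cB : Option (PySem.Set String)),
    ((cA = none ∧ cB = none) ∨
      (∃ a b, cA = some a ∧ cB = some b ∧ a.Nodup ∧ b.Nodup ∧ ∀ m, m ∈ a ↔ m ∈ b)) →
    pvLoopA cov cA vars = pvLoopB (pvBuildIndex cov) cB vars := by
  intro vars
  induction vars with
  | nil =>
    rintro cA cB (⟨rfl, rfl⟩ | ⟨a, b, rfl, rfl, ha, hb, hm⟩)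
    · rfl
    · have hperm : a.Perm b := (List.perm_ext_iff_of_nodup ha hb).mpr hm
      have hlen : a.length = b.length := hperm.length_eq
      simp only [pvLoopA, pvLoopB]
      by_cases h1 : a.length = 1
      · rcases List.length_eq_one_iff.mp h1 with ⟨x, rfl⟩
        rcases List.length_eq_one_iff.mp (hlen ▸ h1) with ⟨y, rfl⟩
        have hxy : x = y := by simpa using (hm x).mp (by simp)
        subst hxy
        simp
      · have h2 : ¬ b.length = 1 := by omega
        simp [h1, h2]
  | cons var rest ih =>
    rintro cA cB hrel
    by_cases hv : var = ""
    · subst hv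
      have hA : pvModulesForVar "" cov = [] := by
        rw [List.eq_nil_iff_forall_not_mem]
        intro m hm
        exact ((pv_mem_modsA _ _ _).mp hm).1 rfl
      simp [pvLoopA, pvLoopB, hA]
    · have hmods : ∀ m, m ∈ PySem.Set.union ((pvBuildIndex cov).getD var []) ((pvBuildIndex cov).getD (pvBase var) []) ↔ m ∈ pvModulesForVar var cov :=
        fun m => pv_mods_iff var m cov hv
      have hAnd : (pvModulesForVar var cov).Nodup := pv_nodup_modsA var cov
      have hBnd : (PySem.Set.union ((pvBuildIndex cov).getD var []) ((pvBuildIndex cov).getD (pvBase var) [])).Nodup :=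
        PySem.Set.nodup_union _ _ (pv_nodup_index cov var)
      simp only [pvLoopA, pvLoopB, if_neg hv]
      by_cases hE : pvModulesForVar var cov = []
      · have hE' : PySem.Set.union ((pvBuildIndex cov).getD var []) ((pvBuildIndex cov).getD (pvBase var) []) = [] := by
          rw [List.eq_nil_iff_forall_not_mem]
          intro m hm
          exact List.not_mem_nil (hE ▸ (hmods m).mp hm)
        rw [if_pos hE, if_pos hE']
      · have hE' : PySem.Set.union ((pvBuildIndex cov).getD var []) ((pvBuildIndex cov).getD (pvBase var) []) ≠ [] := by
          rcases List.exists_mem_of_ne_nil _ hE with ⟨m, hm⟩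
          exact fun h => List.not_mem_nil (h ▸ (hmods m).mpr hm)
        rw [if_neg hE, if_neg hE']
        rcases hrel with ⟨rfl, rfl⟩ | ⟨a, b, rfl, rfl, ha, hb, hmem⟩
        · rw [if_neg hE, if_neg hE']
          exact ih (some _) (some _) (Or.inr ⟨_, _, rfl, rfl, hAnd, hBnd, fun m => (hmods m).symm⟩)
        · have hmem' : ∀ m, m ∈ PySem.Set.inter a (pvModulesForVar var cov) ↔
              m ∈ PySem.Set.inter b (PySem.Set.union ((pvBuildIndex cov).getD var []) ((pvBuildIndex cov).getD (pvBase var) [])) := by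
            intro m
            rw [PySem.Set.mem_inter, PySem.Set.mem_inter]
            exact and_congr (hmem m) (hmods m).symm
          by_cases hCE : PySem.Set.inter a (pvModulesForVar var cov) = []
          · have hCE' : PySem.Set.inter b (PySem.Set.union ((pvBuildIndex cov).getD var []) ((pvBuildIndex cov).getD (pvBase var) [])) = [] := by
              rw [List.eq_nil_iff_forall_not_mem]
              intro m hm
              exact List.not_mem_nil (hCE ▸ (hmem' m).mpr hm)
            rw [if_pos hCE, if_pos hCE']
          · have hCE' : PySem.Set.inter b (PySem.Set.union ((pvBuildIndex cov).getD var []) ((pvBuildIndex cov).getD (pvBase var) [])) ≠ [] := by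
              rcases List.exists_mem_of_ne_nil _ hCE with ⟨m, hm⟩
              exact fun h => List.not_mem_nil (h ▸ (hmem' m).mp hm)
            rw [if_neg hCE, if_neg hCE']
            exact ih (some _) (some _)
              (Or.inr ⟨_, _, rfl, rfl, PySem.Set.nodup_inter _ _ ha, PySem.Set.nodup_inter _ _ hb, hmem'⟩)

-- ===== VERDICT (by name: the statement is the Claim_ definition above) =====
theorem find_common_module_py_spec : Claim_equal_find_common_module_py := by
  intro vars_list module_cov _ _
  unfold Spec_find_common_module_py find_common_module_py find_common_module_py_alt
  exact pv_loop_eq module_cov vars_list none none (Or.inl ⟨rfl, rfl⟩)
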